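-- pv_equiv track=rewrite | github.com/srikar0805/studentsafety-companion | scripts/populate_all_transit.py | identify_route
-- ===== SOURCE A (Python) =====
-- ROUTE_IDENTIFIERS = {
--     1: ['green meadow', 'south providence', 'nifong', 'carter lane'],
--     2: ['west broadway', 'walmart', 'briarwood', 'clinkscales', 'park de ville', 'fairview'],
--     3: ['oak towers', 'west worley', 'bernadette', 'food bank', 'sexton'],
--     4: ['rangeline', 'ashley street', 'brown school', 'derby ridge', 'smiley'],
--     5: ['ballenger', 'clark lane', 'whitegate', 'hanover', 'rice road', 'mckee'],
--     6: ['boone hospital', 'broadway village', 'keene', 'conley road', 'trimble'],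
-- }
--
-- def identify_route(stop_names_lower):
--     """Identify which route a group of stops belongs to."""
--     scores = {}
--     for route_num, keywords in ROUTE_IDENTIFIERS.items():
--         score = sum(1 for kw in keywords if any(kw in name for name in stop_names_lower))
--         scores[route_num] = score
--
--     best = max(scores, key=scores.get)
--     if scores[best] > 0:
--         return best
--     return 0
-- ===== SOURCE B (Python) =====
-- ROUTE_IDENTIFIERS = {
--     1: ['green meadow', 'south providence', 'nifong', 'carter lane'],
--     2: ['west broadway', 'walmart', 'briarwood', 'clinkscales', 'park de ville', 'fairview'],
--     3: ['oak towers', 'west worley', 'bernadette', 'food bank', 'sexton'],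
--     4: ['rangeline', 'ashley street', 'brown school', 'derby ridge', 'smiley'],
--     5: ['ballenger', 'clark lane', 'whitegate', 'hanover', 'rice road', 'mckee'],
--     6: ['boone hospital', 'broadway village', 'keene', 'conley road', 'trimble'],
-- }
--
-- # flat keyword -> route index, built once
-- KEYWORD_INDEX = [(kw, rt) for rt, kws in ROUTE_IDENTIFIERS.items() for kw in kws]
--
-- def identify_route(stop_names_lower):
--     """Identify which route a group of stops belongs to."""
--     pending = list(KEYWORD_INDEX)
--     counts = [0] * 7
--     for name in stop_names_lower:
--         still = []
--         for kw, rt in pending: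
--             if kw in name:
--                 counts[rt] += 1
--             else:
--                 still.append((kw, rt))
--         pending = still
--     best = 0
--     best_score = 0
--     for rt in range(1, 7):
--         if counts[rt] > best_score:
--             best = rt
--             best_score = counts[rt]
--     return best
-- ===== Notes on version B (the rewrite author's own statement) =====
-- stated objective: alternative
-- what changed: B flattens ROUTE_IDENTIFIERS into a keyword->route index built once and replaces A's per-route any()-scan plus scores dict and max() by a single stop-outer pass over a shrinking worklist (a keyword is removed as soon as one stop contains it, incrementing an array of per-route counts), followed by an explicit argmax loop over routes 1..6.
import Mathlib
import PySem

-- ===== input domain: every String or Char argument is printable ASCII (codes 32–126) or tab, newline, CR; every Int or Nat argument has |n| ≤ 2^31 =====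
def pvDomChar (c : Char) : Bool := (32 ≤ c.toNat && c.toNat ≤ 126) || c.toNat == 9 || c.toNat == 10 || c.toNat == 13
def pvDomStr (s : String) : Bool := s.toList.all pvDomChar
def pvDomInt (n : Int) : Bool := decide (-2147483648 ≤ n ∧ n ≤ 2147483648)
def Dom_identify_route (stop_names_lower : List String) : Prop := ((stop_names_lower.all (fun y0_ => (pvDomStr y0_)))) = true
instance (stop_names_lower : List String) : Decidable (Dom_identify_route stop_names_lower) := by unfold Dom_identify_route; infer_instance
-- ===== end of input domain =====

-- B replaces A's per-route any()-scan + scores dict + max() by a flat keyword->route index,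
-- a single stop-outer pass over a shrinking worklist (matched keywords are removed and bump an
-- array of per-route counts), and an explicit argmax loop over routes 1..6 (alternative decomposition).

-- module-level constant ROUTE_IDENTIFIERS (A's form)
def routeIdentifiers : List (Int × List String) :=
  [(1, ["green meadow", "south providence", "nifong", "carter lane"]),
   (2, ["west broadway", "walmart", "briarwood", "clinkscales", "park de ville", "fairview"]),
   (3, ["oak towers", "west worley", "bernadette", "food bank", "sexton"]),
   (4, ["rangeline", "ashley street", "brown school", "derby ridge", "smiley"]),
   (5, ["ballenger", "clark lane", "whitegate", "hanover", "rice road", "mckee"]),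
   (6, ["boone hospital", "broadway village", "keene", "conley road", "trimble"])]

-- ===== PORT A =====
def identify_route (stop_names_lower : List String) : Int :=
  let scores : PySem.Dict Int Int :=
    routeIdentifiers.foldl (fun scores p =>
      let score : Int :=
        ((p.2.filter (fun kw => stop_names_lower.any (fun name => PySem.Str.isIn kw name))).length : Int)
      scores.insert p.1 score) PySem.Dict.empty
  match PySem.List.max? scores.keys (fun k => scores.getD k 0) with
  | none => 0
  | some best => if scores.getD best 0 > 0 then best else 0

-- ===== PORT B =====
-- B's module-level KEYWORD_INDEX = [(kw, rt) for rt, kws in ROUTE_IDENTIFIERS.items() for kw in kws]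
def keywordIndex : List (String × Int) :=
  routeIdentifiers.foldl (fun acc p => acc ++ p.2.map (fun kw => (kw, p.1))) []

-- body of the inner 'for kw, rt in pending' loop of Source B
def innerF (name : String) (st2 : List (String × Int) × List Int) (q : String × Int) :
    List (String × Int) × List Int :=
  if PySem.Str.isIn q.1 name then
    (st2.1, PySem.List.pySetD st2.2 q.2 (PySem.List.pyGetD st2.2 q.2 0 + 1))
  else (st2.1 ++ [q], st2.2)

-- body of the outer 'for name in stop_names_lower' loop of Source B
def outerF (st : List (String × Int) × List Int) (name : String) :
    List (String × Int) × List Int :=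
  st.1.foldl (innerF name) ([], st.2)

def identify_route_alt (stop_names_lower : List String) : Int :=
  let st := stop_names_lower.foldl outerF (keywordIndex, List.replicate 7 (0 : Int))
  ((PySem.List.pyRange 1 7 1).foldl (fun (b : Int × Int) rt =>
      if PySem.List.pyGetD st.2 rt 0 > b.2 then (rt, PySem.List.pyGetD st.2 rt 0) else b)
    ((0 : Int), (0 : Int))).1

-- ===== PRECONDITION & SPEC =====
def Spec_identify_route (stop_names_lower : List String) (out : Int) : Prop := out = identify_route_alt stop_names_lower
instance (stop_names_lower : List String) (out : Int) : Decidable (Spec_identify_route stop_names_lower out) := by unfold Spec_identify_route; infer_instance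

-- ===== CLAIM (what is proved, stated in full; the proofs are below) =====
def Claim_equal_identify_route : Prop := ∀ (stop_names_lower : List String), Dom_identify_route stop_names_lower → Spec_identify_route stop_names_lower (identify_route stop_names_lower)

-- ===== LEMMAS AND PROOFS =====

-- the pending worklist after one stop: keywords not contained in that stop
lemma inner_fst (name : String) (p : List (String × Int)) (still : List (String × Int))
    (counts : List Int) :
    (p.foldl (innerF name) (still, counts)).1 =
      still ++ p.filter (fun q => !PySem.Str.isIn q.1 name) := by
  induction p generalizing still counts with
  | nil => simp
  | cons q t ih =>
    simp only [List.foldl_cons, innerF]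
    by_cases h : PySem.Str.isIn q.1 name = true
    · have hc : PySem.Chars.isIn q.1.toList name.toList = true := h
      rw [if_pos h]; simp [ih, List.filter_cons, hc]
    · have hc : ¬ PySem.Chars.isIn q.1.toList name.toList = true := h
      rw [if_neg h]; simp [ih, List.filter_cons, hc]

lemma inner_len (name : String) (p : List (String × Int)) (still : List (String × Int))
    (counts : List Int) :
    (p.foldl (innerF name) (still, counts)).2.length = counts.length := by
  induction p generalizing still counts with
  | nil => rfl
  | cons q t ih =>
    simp only [List.foldl_cons, innerF]
    by_cases h : PySem.Str.isIn q.1 name = true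
    · rw [if_pos h]; simp [ih, PySem.List.length_pySetD]
    · rw [if_neg h]; simp [ih]

lemma inner_getD (name : String) (p : List (String × Int)) (still : List (String × Int))
    (counts : List Int) (j : Nat) (d : Int)
    (hb : ∀ q ∈ p, 0 ≤ q.2 ∧ q.2.toNat < counts.length) :
    (p.foldl (innerF name) (still, counts)).2.getD j d =
      counts.getD j d +
        ((p.filter (fun q => q.2 == (j : Int) && PySem.Str.isIn q.1 name)).length : Int) := by
  induction p generalizing still counts with
  | nil => simp
  | cons q t ih =>
    obtain ⟨h0, hlt⟩ := hb q (List.mem_cons_self ..)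
    have hbt : ∀ q ∈ t, 0 ≤ q.2 ∧ q.2.toNat < counts.length :=
      fun x hx => hb x (List.mem_cons_of_mem _ hx)
    simp only [List.foldl_cons, innerF, List.filter_cons]
    by_cases h : PySem.Str.isIn q.1 name = true
    · have hset : PySem.List.pySetD counts q.2 (PySem.List.pyGetD counts q.2 0 + 1) =
          counts.set q.2.toNat (counts.getD q.2.toNat 0 + 1) := by
        rw [PySem.List.pySetD_of_nonneg _ _ h0, PySem.List.pyGetD_of_nonneg _ _ h0]
      rw [h, if_pos rfl, hset, ih _ _ (by simpa [List.length_set] using hbt)]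
      have hgd : (counts.set q.2.toNat (counts.getD q.2.toNat 0 + 1)).getD j d =
          if q.2.toNat = j then counts.getD q.2.toNat 0 + 1 else counts.getD j d := by
        simp [List.getD_eq_getElem?_getD, List.getElem?_set]
        split <;> simp_all [List.getElem?_eq_getElem hlt]
      rw [hgd]
      by_cases hj : q.2 = (j : Int)
      · have hq : q.2.toNat = j := by omega
        have hlt' : j < counts.length := by omega
        have hsome : counts[j]? = some (counts[j]'hlt') := List.getElem?_eq_getElem hlt'
        simp [hq, hj, List.getD_eq_getElem?_getD, hsome]
        push_cast
        omega
      · have hq : ¬ q.2.toNat = j := by omega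
        simp [hq, hj, h]
    · rw [if_neg h, ih _ _ hbt]
      have hC : PySem.Chars.isIn q.1.toList name.toList ≠ true := h
      simp [hC]

-- a matched element counts once: split a filter over 'x or y' at x, removing x-hits
lemma count_split_gen {α : Type} (p : List α) (x y z : α → Bool) :
    (p.filter (fun q => z q && (x q || y q))).length =
      (p.filter (fun q => z q && x q)).length +
      ((p.filter (fun q => !x q)).filter (fun q => z q && y q)).length := by
  induction p with
  | nil => rfl
  | cons q t ih =>
    simp only [List.filter_cons]
    cases hx : x q <;> cases hy : y q <;> cases hz : z q <;>
      simp [List.filter_cons, hx, hy, hz, ih] <;> omega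

lemma outer_getD (ns : List String) (p : List (String × Int)) (counts : List Int)
    (j : Nat) (d : Int)
    (hb : ∀ q ∈ p, 0 ≤ q.2 ∧ q.2.toNat < counts.length) :
    (ns.foldl outerF (p, counts)).2.getD j d =
      counts.getD j d +
        ((p.filter (fun q => q.2 == (j : Int) &&
            ns.any (fun n => PySem.Str.isIn q.1 n))).length : Int) := by
  induction ns generalizing p counts with
  | nil => simp
  | cons n t ih =>
    have hpair : outerF (p, counts) n =
        (p.filter (fun q => !PySem.Str.isIn q.1 n), (p.foldl (innerF n) ([], counts)).2) := by
      unfold outerF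
      refine Prod.ext ?_ rfl
      simpa using inner_fst n p [] counts
    rw [List.foldl_cons, hpair,
      ih _ _ (fun q hq => by
        have := hb q (List.mem_of_mem_filter hq)
        simpa [inner_len] using this),
      inner_getD n p [] counts j d hb]
    simp only [List.any_cons]
    rw [count_split_gen p (fun q => PySem.Str.isIn q.1 n)
      (fun q => t.any fun m => PySem.Str.isIn q.1 m) (fun q => q.2 == (j : Int))]
    push_cast
    ring

-- A's selection (dict + max) and B's selection (running argmax), over six symbolic scores
def selA (s1 s2 s3 s4 s5 s6 : Int) : Int :=
  let scores : PySem.Dict Int Int :=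
    ((((((PySem.Dict.empty.insert 1 s1).insert 2 s2).insert 3 s3).insert 4 s4).insert 5 s5).insert 6 s6)
  match PySem.List.max? scores.keys (fun k => scores.getD k 0) with
  | none => 0
  | some best => if scores.getD best 0 > 0 then best else 0

def selStep (st : Int × Int) (r s : Int) : Int × Int := if s > st.2 then (r, s) else st

def selB (s1 s2 s3 s4 s5 s6 : Int) : Int :=
  (selStep (selStep (selStep (selStep (selStep (selStep ((0 : Int), (0 : Int)) 1 s1) 2 s2) 3 s3) 4 s4) 5 s5) 6 s6).1

set_option maxHeartbeats 4000000 in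
lemma sel_eq (s1 s2 s3 s4 s5 s6 : Int) (g1 : 0 ≤ s1) (g2 : 0 ≤ s2) (g3 : 0 ≤ s3)
    (g4 : 0 ≤ s4) (g5 : 0 ≤ s5) (g6 : 0 ≤ s6) :
    selA s1 s2 s3 s4 s5 s6 = selB s1 s2 s3 s4 s5 s6 := by
  simp only [selA, selB, selStep, PySem.Dict.insert, PySem.Dict.getD, PySem.Dict.get?,
    PySem.Dict.keys, PySem.Dict.empty, PySem.Dict.contains, PySem.List.max?,
    List.map, beq_iff_eq, Option.map, Option.getD]
  norm_num
  split_ifs <;> simp_all <;> try omega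
  all_goals (split_ifs <;> simp_all <;> try omega)
  all_goals (split_ifs <;> simp_all <;> try omega)
  all_goals (split_ifs <;> simp_all <;> try omega)
  all_goals (split_ifs <;> simp_all <;> omega)

-- B's flat count at route j equals A's per-route filtered-keyword count
lemma filt_split (l : List (String × Int)) (r : Int) (names : List String) :
    (l.filter (fun q => q.2 == r && names.any (fun n => PySem.Str.isIn q.1 n))).length =
      (((l.filter (fun q => q.2 == r)).map Prod.fst).filter
        (fun kw => names.any (fun n => PySem.Str.isIn kw n))).length := by
  induction l with
  | nil => rfl
  | cons q t ih =>
    by_cases hj : q.2 = r <;>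
      by_cases hf : (names.any fun n => PySem.Chars.isIn q.1.toList n.toList) = true <;>
        simp_all [List.filter_cons]

-- the final per-route scores of B, as a function of the stop list
lemma alt_getD (names : List String) (r : Nat) :
    ((names.foldl outerF (keywordIndex, List.replicate 7 (0 : Int))).2).getD r 0 =
      ((((keywordIndex.filter (fun q => q.2 == (r : Int))).map Prod.fst).filter
          (fun kw => names.any (fun n => PySem.Str.isIn kw n))).length : Int) := by
  rw [outer_getD names keywordIndex (List.replicate 7 (0 : Int)) r 0
    (by decide), filt_split keywordIndex (r : Int) names]
  have h0 : (List.replicate 7 (0 : Int)).getD r 0 = 0 := by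
    rcases r with _|_|_|_|_|_|_|r <;> simp [List.getD_eq_getElem?_getD]
  rw [h0, zero_add]

-- ===== VERDICT (by name: the statement is the Claim_ definition above) =====
theorem identify_route_spec : Claim_equal_identify_route := by
  intro names _
  show identify_route names = identify_route_alt names
  have hA : identify_route names =
      selA ((List.filter (fun kw => names.any fun n => PySem.Str.isIn kw n) ["green meadow", "south providence", "nifong", "carter lane"]).length : Int)
           ((List.filter (fun kw => names.any fun n => PySem.Str.isIn kw n) ["west broadway", "walmart", "briarwood", "clinkscales", "park de ville", "fairview"]).length : Int)
           ((List.filter (fun kw => names.any fun n => PySem.Str.isIn kw n) ["oak towers", "west worley", "bernadette", "food bank", "sexton"]).length : Int)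
           ((List.filter (fun kw => names.any fun n => PySem.Str.isIn kw n) ["rangeline", "ashley street", "brown school", "derby ridge", "smiley"]).length : Int)
           ((List.filter (fun kw => names.any fun n => PySem.Str.isIn kw n) ["ballenger", "clark lane", "whitegate", "hanover", "rice road", "mckee"]).length : Int)
           ((List.filter (fun kw => names.any fun n => PySem.Str.isIn kw n) ["boone hospital", "broadway village", "keene", "conley road", "trimble"]).length : Int) := rfl
  have hB : identify_route_alt names =
      selB (PySem.List.pyGetD ((names.foldl outerF (keywordIndex, List.replicate 7 (0 : Int))).2) 1 0)
           (PySem.List.pyGetD ((names.foldl outerF (keywordIndex, List.replicate 7 (0 : Int))).2) 2 0)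
           (PySem.List.pyGetD ((names.foldl outerF (keywordIndex, List.replicate 7 (0 : Int))).2) 3 0)
           (PySem.List.pyGetD ((names.foldl outerF (keywordIndex, List.replicate 7 (0 : Int))).2) 4 0)
           (PySem.List.pyGetD ((names.foldl outerF (keywordIndex, List.replicate 7 (0 : Int))).2) 5 0)
           (PySem.List.pyGetD ((names.foldl outerF (keywordIndex, List.replicate 7 (0 : Int))).2) 6 0) := rfl
  have e1 : (List.filter (fun q => q.2 == ((1 : Nat) : Int)) keywordIndex).map Prod.fst =
      ["green meadow", "south providence", "nifong", "carter lane"] := rfl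
  have e2 : (List.filter (fun q => q.2 == ((2 : Nat) : Int)) keywordIndex).map Prod.fst =
      ["west broadway", "walmart", "briarwood", "clinkscales", "park de ville", "fairview"] := rfl
  have e3 : (List.filter (fun q => q.2 == ((3 : Nat) : Int)) keywordIndex).map Prod.fst =
      ["oak towers", "west worley", "bernadette", "food bank", "sexton"] := rfl
  have e4 : (List.filter (fun q => q.2 == ((4 : Nat) : Int)) keywordIndex).map Prod.fst =
      ["rangeline", "ashley street", "brown school", "derby ridge", "smiley"] := rfl
  have e5 : (List.filter (fun q => q.2 == ((5 : Nat) : Int)) keywordIndex).map Prod.fst =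
      ["ballenger", "clark lane", "whitegate", "hanover", "rice road", "mckee"] := rfl
  have e6 : (List.filter (fun q => q.2 == ((6 : Nat) : Int)) keywordIndex).map Prod.fst =
      ["boone hospital", "broadway village", "keene", "conley road", "trimble"] := rfl
  rw [hA, hB]
  simp only [PySem.List.pyGetD_ofNat']
  rw [alt_getD names 1, alt_getD names 2, alt_getD names 3,
    alt_getD names 4, alt_getD names 5, alt_getD names 6, e1, e2, e3, e4, e5, e6]
  exact sel_eq _ _ _ _ _ _ (Int.natCast_nonneg _) (Int.natCast_nonneg _) (Int.natCast_nonneg _)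
    (Int.natCast_nonneg _) (Int.natCast_nonneg _) (Int.natCast_nonneg _)
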